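-- pv_equiv track=rewrite | github.com/ubc-systopia/Indaleko | IndalekoWindowsLocalIndexer.py | windows_to_posix
-- ===== SOURCE A (Python) =====
-- def windows_to_posix(filename):
--     """
--     Convert a Win32 filename to a POSIX-compliant one.
--     """
--     # Define a mapping of Win32 reserved characters to POSIX-friendly characters
--     win32_to_posix = {
--         '<': '_lt_', '>': '_gt_', ':': '_cln_', '"': '_qt_',
--         '/': '_sl_', '\\': '_bsl_', '|': '_bar_', '?': '_qm_', '*': '_ast_'
--     }
--     for win32_char, posix_char in win32_to_posix.items():
--         filename = filename.replace(win32_char, posix_char)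
--     return filename
-- ===== SOURCE B (Python) =====
-- def _map_char(c):
--     if c == '<':
--         return '_lt_'
--     elif c == '>':
--         return '_gt_'
--     elif c == ':':
--         return '_cln_'
--     elif c == '"':
--         return '_qt_'
--     elif c == '/':
--         return '_sl_'
--     elif c == '\\':
--         return '_bsl_'
--     elif c == '|':
--         return '_bar_'
--     elif c == '?':
--         return '_qm_'
--     elif c == '*':
--         return '_ast_'
--     else:
--         return c
--
--
-- def windows_to_posix(filename):
--     """
--     Convert a Win32 filename to a POSIX-compliant one.
--     """
--     parts = []
--     for c in filename:
--         parts.append(_map_char(c))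
--     return ''.join(parts)
-- ===== Notes on version B (the rewrite author's own statement) =====
-- stated objective: alternative
-- what changed: Replaces nine sequential full-string str.replace passes (driven by a dict) with a single character-by-character pass: an if/elif chain maps each character to its token and the pieces are joined once.
import Mathlib
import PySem

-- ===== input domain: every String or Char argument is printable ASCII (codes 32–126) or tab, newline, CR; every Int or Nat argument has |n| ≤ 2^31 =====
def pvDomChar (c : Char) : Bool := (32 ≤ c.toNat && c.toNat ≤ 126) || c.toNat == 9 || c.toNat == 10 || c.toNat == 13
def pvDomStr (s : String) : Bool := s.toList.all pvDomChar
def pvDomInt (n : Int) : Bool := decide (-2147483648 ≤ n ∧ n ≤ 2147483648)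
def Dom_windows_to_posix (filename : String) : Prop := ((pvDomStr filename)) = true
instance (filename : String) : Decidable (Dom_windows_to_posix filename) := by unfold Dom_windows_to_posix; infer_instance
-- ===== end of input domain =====

-- B rebuilds the string in one pass, mapping each character through an if/elif chain
-- and joining the pieces once, instead of A's nine dict-driven full-string replace passes.


-- ===== PORT A =====
def windows_to_posix (filename : String) : String :=
  let win32_to_posix : PySem.Dict String String := PySem.Dict.ofList
    [("<", "_lt_"), (">", "_gt_"), (":", "_cln_"), ("\"", "_qt_"),
     ("/", "_sl_"), ("\\", "_bsl_"), ("|", "_bar_"), ("?", "_qm_"), ("*", "_ast_")]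
  win32_to_posix.items.foldl (fun fn kv => PySem.Str.replace fn kv.1 kv.2) filename

-- ===== PORT B =====
def wtpMapChar (c : Char) : String :=
  if c = '<' then "_lt_"
  else if c = '>' then "_gt_"
  else if c = ':' then "_cln_"
  else if c = '"' then "_qt_"
  else if c = '/' then "_sl_"
  else if c = '\\' then "_bsl_"
  else if c = '|' then "_bar_"
  else if c = '?' then "_qm_"
  else if c = '*' then "_ast_"
  else String.ofList [c]

def windows_to_posix_alt (filename : String) : String :=
  let parts : List String := filename.toList.foldl (fun parts c => parts ++ [wtpMapChar c]) []
  PySem.Str.join "" parts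

-- ===== PRECONDITION & SPEC =====
def Spec_windows_to_posix (filename : String) (out : String) : Prop := out = windows_to_posix_alt filename
instance (filename : String) (out : String) : Decidable (Spec_windows_to_posix filename out) := by unfold Spec_windows_to_posix; infer_instance

-- ===== CLAIM (what is proved, stated in full; the proofs are below) =====
def Claim_equal_windows_to_posix : Prop := ∀ (filename : String), Dom_windows_to_posix filename → Spec_windows_to_posix filename (windows_to_posix filename)

-- ===== LEMMAS AND PROOFS =====

-- the per-character rewriting both programs compute
def pvGmap (c : Char) : List Char :=
  if c = '<' then ['_','l','t','_'] else if c = '>' then ['_','g','t','_']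
  else if c = ':' then ['_','c','l','n','_'] else if c = '"' then ['_','q','t','_']
  else if c = '/' then ['_','s','l','_'] else if c = '\\' then ['_','b','s','l','_']
  else if c = '|' then ['_','b','a','r','_'] else if c = '?' then ['_','q','m','_']
  else if c = '*' then ['_','a','s','t','_'] else [c]

lemma pv_go_single (c : Char) (new : List Char) :
    ∀ (l : List Char) (fuel : Nat) (acc : List Char), l.length ≤ fuel →
      PySem.Chars.replace.go [c] new fuel l acc
        = acc.reverse ++ l.flatMap (fun x => if x = c then new else [x]) := by
  intro l
  induction l with
  | nil => intro fuel acc _; cases fuel <;> simp [PySem.Chars.replace.go]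
  | cons x t ih =>
    intro fuel acc h
    cases fuel with
    | zero => simp at h
    | succ f =>
      rw [PySem.Chars.replace.go]
      by_cases hc : c = x
      · subst hc
        simp only [List.isPrefixOf, List.length_cons] at *
        simp only [BEq.rfl, Bool.true_and, if_true,
          List.length_nil, Nat.zero_add, List.drop_succ_cons, List.drop_zero]
        rw [ih _ _ (by omega)]
        simp
      · have hb : (c == x) = false := beq_eq_false_iff_ne.mpr hc
        simp only [List.isPrefixOf, hb, Bool.false_and]
        rw [ih _ _ (by simp at h; omega)]
        simp [Ne.symm hc]

lemma pv_replace_single (s : List Char) (c : Char) (new : List Char) :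
    PySem.Chars.replace s [c] new = s.flatMap (fun x => if x = c then new else [x]) := by
  rw [PySem.Chars.replace]
  simp only [List.isEmpty_cons]
  rw [pv_go_single c new s s.length [] (le_refl _)]
  simp

lemma pv_join_nil_flatten (xss : List (List Char)) :
    PySem.Chars.join [] xss = xss.flatten := by
  induction xss with
  | nil => rfl
  | cons a t ih =>
    cases t with
    | nil => rfl
    | cons b u =>
      rw [show PySem.Chars.join [] (a :: b :: u)
            = a ++ ([] ++ PySem.Chars.join [] (b :: u)) from rfl, ih]
      simp

lemma pv_A_eq (s : String) : (windows_to_posix s).toList = s.toList.flatMap pvGmap := by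
  have h : windows_to_posix s =
      PySem.Str.replace (PySem.Str.replace (PySem.Str.replace (PySem.Str.replace
        (PySem.Str.replace (PySem.Str.replace (PySem.Str.replace (PySem.Str.replace
          (PySem.Str.replace s "<" "_lt_") ">" "_gt_") ":" "_cln_") "\"" "_qt_")
            "/" "_sl_") "\\" "_bsl_") "|" "_bar_") "?" "_qm_") "*" "_ast_" := rfl
  rw [h]
  simp only [PySem.Str.toList_replace]
  simp only [show ("<" : String).toList = ['<'] from rfl,
    show (">" : String).toList = ['>'] from rfl,
    show (":" : String).toList = [':'] from rfl,
    show ("\"" : String).toList = ['"'] from rfl,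
    show ("/" : String).toList = ['/'] from rfl,
    show ("\\" : String).toList = ['\\'] from rfl,
    show ("|" : String).toList = ['|'] from rfl,
    show ("?" : String).toList = ['?'] from rfl,
    show ("*" : String).toList = ['*'] from rfl,
    pv_replace_single, List.flatMap_assoc]
  congr 1
  funext x
  by_cases h1 : x = '<'; · subst h1; decide
  by_cases h2 : x = '>'; · subst h2; decide
  by_cases h3 : x = ':'; · subst h3; decide
  by_cases h4 : x = '"'; · subst h4; decide
  by_cases h5 : x = '/'; · subst h5; decide
  by_cases h6 : x = '\\'; · subst h6; decide
  by_cases h7 : x = '|'; · subst h7; decide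
  by_cases h8 : x = '?'; · subst h8; decide
  by_cases h9 : x = '*'; · subst h9; decide
  simp [pvGmap, h1, h2, h3, h4, h5, h6, h7, h8, h9]

lemma pv_mapChar_toList (c : Char) : (wtpMapChar c).toList = pvGmap c := by
  unfold wtpMapChar pvGmap
  by_cases h1 : c = '<'; · subst h1; decide
  by_cases h2 : c = '>'; · subst h2; decide
  by_cases h3 : c = ':'; · subst h3; decide
  by_cases h4 : c = '"'; · subst h4; decide
  by_cases h5 : c = '/'; · subst h5; decide
  by_cases h6 : c = '\\'; · subst h6; decide
  by_cases h7 : c = '|'; · subst h7; decide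
  by_cases h8 : c = '?'; · subst h8; decide
  by_cases h9 : c = '*'; · subst h9; decide
  simp [h1, h2, h3, h4, h5, h6, h7, h8, h9, String.toList_ofList]

lemma pv_foldl_append (l : List Char) (acc : List String) :
    l.foldl (fun parts c => parts ++ [wtpMapChar c]) acc = acc ++ l.map wtpMapChar := by
  induction l generalizing acc with
  | nil => simp
  | cons x t ih => simp [List.foldl_cons, ih]

lemma pv_B_eq (s : String) : (windows_to_posix_alt s).toList = s.toList.flatMap pvGmap := by
  unfold windows_to_posix_alt
  rw [pv_foldl_append, List.nil_append, PySem.Str.toList_join]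
  simp only [show ("" : String).toList = [] from rfl, pv_join_nil_flatten, List.map_map]
  rw [← List.flatMap_def]
  congr 1
  funext c
  exact pv_mapChar_toList c

-- ===== VERDICT (by name: the statement is the Claim_ definition above) =====
theorem windows_to_posix_spec : Claim_equal_windows_to_posix := by
  intro filename _
  unfold Spec_windows_to_posix
  apply String.toList_inj.mp
  rw [pv_A_eq, pv_B_eq]
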